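-- pv_equiv track=rewrite | github.com/gostnort/FlightCheckPy | scripts/reformat_codes.py | enforce_block_spacing
-- ===== SOURCE A (Python) =====
-- from typing import List, Dict, Tuple
--
-- def find_block_starts(lines: List[str]) -> Dict[int, str]:
--     """
--     Find indices of ANY block starts (at any indentation) and classify as 'class' or 'def'.
--     Handles decorators at the same indentation: the first decorator line is treated
--     as the block start for the subsequent def/class.
--     """
--     idx_to_type: Dict[int, str] = {}
--     n = len(lines)
--     i = 0
--     while i < n:
--         raw = lines[i]
--         stripped = raw.lstrip()
--         if stripped.startswith("class "):
--             idx_to_type[i] = "class"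
--         elif stripped.startswith("def "):
--             idx_to_type[i] = "def"
--         elif stripped.startswith("@"):
--             # Decorator: ensure the following def/class has the SAME indentation
--             curr_indent = len(raw) - len(stripped)
--             j = i + 1
--             block_type = None
--             while j < n:
--                 nxt_raw = lines[j]
--                 nxt_stripped = nxt_raw.lstrip()
--                 if nxt_stripped == "":
--                     j += 1
--                     continue
--                 next_indent = len(nxt_raw) - len(nxt_stripped)
--                 if next_indent != curr_indent:
--                     break
--                 if nxt_stripped.startswith("class "):
--                     block_type = "class"
--                     break
--                 if nxt_stripped.startswith("def "):
--                     block_type = "def"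
--                     break
--                 if nxt_stripped.startswith("@"):
--                     j += 1
--                     continue
--                 break
--             if block_type:
--                 idx_to_type[i] = block_type
--         i += 1
--     return idx_to_type
--
-- def enforce_block_spacing(lines: List[str]) -> List[str]:
--     """
--     Ensure there are exactly 3 blank lines before classes and 2 before functions,
--     for blocks at ANY indentation level. If the block is the very first content
--     in the file, do not insert leading blanks.
--     """
--     idx_to_type = find_block_starts(lines)
--     result: List[str] = []
--     i = 0
--     n = len(lines)
--     while i < n:
--         if i in idx_to_type:
--             need = 3 if idx_to_type[i] == "class" else 2
--             # Strip existing trailing blank lines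
--             while result and result[-1].strip() == "":
--                 result.pop()
--             # Insert the required number of blank lines if not at file start
--             if result:
--                 for _ in range(need):
--                     result.append("\n")
--             result.append(lines[i])
--             i += 1
--             continue
--         result.append(lines[i])
--         i += 1
--     return result
-- ===== SOURCE B (Python) =====
-- from typing import List, Optional
--
-- def _blanks_needed(lines: List[str], i: int) -> Optional[int]:
--     """Blank lines required before lines[i] if it starts a block, else None."""
--     stripped = lines[i].lstrip()
--     if stripped.startswith("class "):
--         return 3
--     if stripped.startswith("def "):
--         return 2
--     if not stripped.startswith("@"):
--         return None
--     indent = len(lines[i]) - len(stripped)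
--     for j in range(i + 1, len(lines)):
--         s = lines[j].lstrip()
--         if s == "":
--             continue
--         if len(lines[j]) - len(s) != indent:
--             return None
--         if s.startswith("class "):
--             return 3
--         if s.startswith("def "):
--             return 2
--         if not s.startswith("@"):
--             return None
--     return None
--
-- def enforce_block_spacing(lines: List[str]) -> List[str]:
--     result: List[str] = []
--     pending: List[str] = []  # run of blank lines not yet committed to result
--     for i, line in enumerate(lines):
--         need = _blanks_needed(lines, i)
--         if need is not None:
--             pending = []
--             if result:
--                 result.extend("\n" for _ in range(need))
--             result.append(line)
--         elif line.strip() == "":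
--             pending.append(line)
--         else:
--             result.extend(pending)
--             pending = []
--             result.append(line)
--     result.extend(pending)
--     return result
-- ===== Notes on version B (the rewrite author's own statement) =====
-- stated objective: simpler
-- what changed: B replaces A's precomputed index-to-type dict (find_block_starts) and its pop-trailing-blanks rescans of the output list with one forward pass that classifies each line inline and keeps pending blank lines in a buffer that is dropped at a block start and flushed otherwise.
import Mathlib
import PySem

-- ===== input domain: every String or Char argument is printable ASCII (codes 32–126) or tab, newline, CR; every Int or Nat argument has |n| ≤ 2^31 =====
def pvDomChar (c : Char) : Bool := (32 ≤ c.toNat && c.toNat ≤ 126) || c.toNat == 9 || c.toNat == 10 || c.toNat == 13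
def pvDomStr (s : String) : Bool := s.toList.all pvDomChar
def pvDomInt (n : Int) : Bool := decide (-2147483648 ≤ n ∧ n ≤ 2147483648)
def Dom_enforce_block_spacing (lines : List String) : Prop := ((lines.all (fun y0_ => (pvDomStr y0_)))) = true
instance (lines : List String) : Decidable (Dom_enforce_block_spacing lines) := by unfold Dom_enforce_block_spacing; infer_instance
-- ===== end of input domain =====

-- B replaces A's precomputed index→type dict and its pop-trailing-blanks rescans of the output
-- by a single forward pass that classifies each line inline and buffers pending blank lines
-- (objective: simpler decomposition, same result).
-- While loops are ported as structural recursion on a fuel counter = number of remaining indices.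

-- ===== PORT A =====
-- inner `while j < n` lookahead of find_block_starts
def pvLookA (lines : List String) (curr_indent : Int) : Nat → Nat → Option String
  | 0, _ => none
  | fuel+1, j =>
    if h : j < lines.length then
      if PySem.Str.lstrip lines[j] = "" then pvLookA lines curr_indent fuel (j+1)
      else if PySem.Str.len lines[j] - PySem.Str.len (PySem.Str.lstrip lines[j]) ≠ curr_indent then none
      else if PySem.Str.startswith (PySem.Str.lstrip lines[j]) "class " then some "class"
      else if PySem.Str.startswith (PySem.Str.lstrip lines[j]) "def " then some "def"
      else if PySem.Str.startswith (PySem.Str.lstrip lines[j]) "@" then pvLookA lines curr_indent fuel (j+1)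
      else none
    else none

-- outer `while i < n` of find_block_starts, building idx_to_type
def find_block_starts_go (lines : List String) : Nat → Nat → PySem.Dict Int String → PySem.Dict Int String
  | 0, _, d => d
  | fuel+1, i, d =>
    if h : i < lines.length then
      find_block_starts_go lines fuel (i+1)
        (if PySem.Str.startswith (PySem.Str.lstrip lines[i]) "class " then d.insert (i : Int) "class"
         else if PySem.Str.startswith (PySem.Str.lstrip lines[i]) "def " then d.insert (i : Int) "def"
         else if PySem.Str.startswith (PySem.Str.lstrip lines[i]) "@" then
           match pvLookA lines (PySem.Str.len lines[i] - PySem.Str.len (PySem.Str.lstrip lines[i]))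
               (lines.length - (i+1)) (i+1) with
           | some t => d.insert (i : Int) t
           | none => d
         else d)
    else d

def find_block_starts (lines : List String) : PySem.Dict Int String :=
  find_block_starts_go lines lines.length 0 PySem.Dict.empty

-- `while result and result[-1].strip() == "": result.pop()`, working from the tail
def pvDropBlanksRev : List String → List String
  | [] => []
  | s :: rest => if PySem.Str.strip s = "" then pvDropBlanksRev rest else s :: rest

def pvPopA (r : List String) : List String := (pvDropBlanksRev r.reverse).reverse

-- main `while i < n` of enforce_block_spacing
def enforce_block_spacing_go (lines : List String) (d : PySem.Dict Int String) :
    Nat → Nat → List String → List String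
  | 0, _, result => result
  | fuel+1, i, result =>
    if h : i < lines.length then
      match d.get? (i : Int) with
      | some t =>
          let need : Int := if t = "class" then 3 else 2
          let r1 := pvPopA result
          let r2 := if r1 = [] then r1 else r1 ++ List.replicate need.toNat "\n"
          enforce_block_spacing_go lines d fuel (i+1) (r2 ++ [lines[i]])
      | none => enforce_block_spacing_go lines d fuel (i+1) (result ++ [lines[i]])
    else result

def enforce_block_spacing (lines : List String) : List String :=
  enforce_block_spacing_go lines (find_block_starts lines) lines.length 0 []

-- ===== PORT B =====
-- lookahead loop of _blanks_needed (the decorator case)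
def pvLookB (lines : List String) (indent : Int) : Nat → Nat → Option Int
  | 0, _ => none
  | fuel+1, j =>
    if h : j < lines.length then
      if PySem.Str.lstrip lines[j] = "" then pvLookB lines indent fuel (j+1)
      else if PySem.Str.len lines[j] - PySem.Str.len (PySem.Str.lstrip lines[j]) ≠ indent then none
      else if PySem.Str.startswith (PySem.Str.lstrip lines[j]) "class " then some 3
      else if PySem.Str.startswith (PySem.Str.lstrip lines[j]) "def " then some 2
      else if PySem.Str.startswith (PySem.Str.lstrip lines[j]) "@" then pvLookB lines indent fuel (j+1)
      else none
    else none

def pvBlanksNeeded (lines : List String) (i : Nat) : Option Int :=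
  if PySem.Str.startswith (PySem.Str.lstrip (lines.getD i "")) "class " then some 3
  else if PySem.Str.startswith (PySem.Str.lstrip (lines.getD i "")) "def " then some 2
  else if ¬ PySem.Str.startswith (PySem.Str.lstrip (lines.getD i "")) "@" then none
  else pvLookB lines (PySem.Str.len (lines.getD i "") - PySem.Str.len (PySem.Str.lstrip (lines.getD i "")))
    (lines.length - (i+1)) (i+1)

-- the single `for i, line in enumerate(lines)` pass with the pending-blank buffer
def enforce_block_spacing_alt_go (lines : List String) :
    Nat → Nat → List String → List String → List String
  | 0, _, result, pending => result ++ pending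
  | fuel+1, i, result, pending =>
    if h : i < lines.length then
      match pvBlanksNeeded lines i with
      | some need =>
          enforce_block_spacing_alt_go lines fuel (i+1)
            (if result = [] then result ++ [lines[i]]
             else result ++ List.replicate need.toNat "\n" ++ [lines[i]]) []
      | none =>
          if PySem.Str.strip lines[i] = "" then
            enforce_block_spacing_alt_go lines fuel (i+1) result (pending ++ [lines[i]])
          else
            enforce_block_spacing_alt_go lines fuel (i+1) (result ++ pending ++ [lines[i]]) []
    else result ++ pending

def enforce_block_spacing_alt (lines : List String) : List String :=
  enforce_block_spacing_alt_go lines lines.length 0 [] []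

-- ===== PRECONDITION & SPEC =====
def Spec_enforce_block_spacing (lines : List String) (out : List String) : Prop := out = enforce_block_spacing_alt lines
instance (lines : List String) (out : List String) : Decidable (Spec_enforce_block_spacing lines out) := by unfold Spec_enforce_block_spacing; infer_instance

-- ===== CLAIM (what is proved, stated in full; the proofs are below) =====
def Claim_equal_enforce_block_spacing : Prop := ∀ (lines : List String), Dom_enforce_block_spacing lines → Spec_enforce_block_spacing lines (enforce_block_spacing lines)

-- ===== LEMMAS AND PROOFS =====

-- A's per-index classification, extracted for the proofs
def pvClassify (lines : List String) (i : Nat) : Option String :=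
  if PySem.Str.startswith (PySem.Str.lstrip (lines.getD i "")) "class " then some "class"
  else if PySem.Str.startswith (PySem.Str.lstrip (lines.getD i "")) "def " then some "def"
  else if PySem.Str.startswith (PySem.Str.lstrip (lines.getD i "")) "@" then
    pvLookA lines (PySem.Str.len (lines.getD i "") - PySem.Str.len (PySem.Str.lstrip (lines.getD i "")))
      (lines.length - (i+1)) (i+1)
  else none

def pvNeedOf (t : String) : Int := if t = "class" then 3 else 2

lemma chars_strip_nil (cs : List Char) (h : PySem.Chars.strip cs = []) :
    PySem.Chars.lstrip cs = [] := by
  induction cs with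
  | nil => rfl
  | cons c t ih =>
    by_cases hc : PySem.Chars.isspace c = true
    · have h' : PySem.Chars.strip t = [] := by
        simpa [PySem.Chars.strip, PySem.Chars.lstrip, List.dropWhile_cons, hc] using h
      simpa [PySem.Chars.lstrip, List.dropWhile_cons, hc] using ih h'
    · exfalso
      have h2 : PySem.Chars.rstrip (c :: t) = [] := by
        simpa [PySem.Chars.strip, PySem.Chars.lstrip, List.dropWhile_cons, hc] using h
      have h3 : List.dropWhile PySem.Chars.isspace (c :: t).reverse = [] := by
        have := congrArg List.reverse h2
        simpa [PySem.Chars.rstrip] using this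
      rw [List.dropWhile_eq_nil_iff] at h3
      exact hc (h3 c (by simp))

lemma strip_empty_lstrip (s : String) (h : PySem.Str.strip s = "") :
    PySem.Str.lstrip s = "" := by
  have h1 : PySem.Chars.strip s.toList = [] := by
    have := congrArg String.toList h
    simpa [PySem.Str.toList_strip] using this
  have h2 : PySem.Chars.lstrip s.toList = [] := chars_strip_nil _ h1
  show String.ofList (PySem.Chars.lstrip s.toList) = ""
  rw [h2]

lemma classify_nonblank (lines : List String) (i : Nat) (t : String)
    (h : pvClassify lines i = some t) : PySem.Str.strip (lines.getD i "") ≠ "" := by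
  intro hb
  have hl := strip_empty_lstrip _ hb
  unfold pvClassify at h
  rw [hl] at h
  simp [PySem.Str.startswith, PySem.Chars.startswith, List.isPrefixOf] at h

lemma look_eq (lines : List String) (ind : Int) :
    ∀ fuel j, pvLookB lines ind fuel j = (pvLookA lines ind fuel j).map pvNeedOf := by
  intro fuel
  induction fuel with
  | zero => intro j; rfl
  | succ fuel ih =>
    intro j
    simp only [pvLookA, pvLookB]
    by_cases h : j < lines.length
    · simp only [h, dif_pos]
      split_ifs with h1 h2 h3 h4 h5
      · exact ih (j+1)
      · rfl
      · simp [pvNeedOf]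
      · simp [pvNeedOf]
      · exact ih (j+1)
      · rfl
    · simp [h]

lemma needed_eq (lines : List String) (i : Nat) :
    pvBlanksNeeded lines i = (pvClassify lines i).map pvNeedOf := by
  unfold pvBlanksNeeded pvClassify
  rcases Bool.eq_false_or_eq_true
      (PySem.Str.startswith (PySem.Str.lstrip (lines.getD i "")) "class ") with h1 | h1
  · rw [h1]; simp [pvNeedOf]
  · rw [h1]
    rcases Bool.eq_false_or_eq_true
        (PySem.Str.startswith (PySem.Str.lstrip (lines.getD i "")) "def ") with h2 | h2
    · rw [h2]; simp [pvNeedOf]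
    · rw [h2]
      rcases Bool.eq_false_or_eq_true
          (PySem.Str.startswith (PySem.Str.lstrip (lines.getD i "")) "@") with h3 | h3
      · rw [h3]
        have hL := look_eq lines
          (PySem.Str.len (lines.getD i "") - PySem.Str.len (PySem.Str.lstrip (lines.getD i "")))
          (lines.length - (i+1)) (i+1)
        simpa using hL
      · rw [h3]; simp

lemma fbs_go_get_lt (lines : List String) :
    ∀ fuel i d (k : Nat), k < i →
      (find_block_starts_go lines fuel i d).get? (k : Int) = d.get? (k : Int) := by
  intro fuel
  induction fuel with
  | zero => intro i d k _; rfl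
  | succ fuel ih =>
    intro i d k hk
    simp only [find_block_starts_go]
    by_cases h : i < lines.length
    · simp only [h, dif_pos]
      rw [ih (i+1) _ k (by omega)]
      have hne : (k : Int) ≠ (i : Int) := by omega
      split_ifs with ha hb hc
      · exact PySem.Dict.get?_insert_of_ne d _ hne
      · exact PySem.Dict.get?_insert_of_ne d _ hne
      · cases hL : pvLookA lines (PySem.Str.len lines[i] - PySem.Str.len (PySem.Str.lstrip lines[i]))
            (lines.length - (i+1)) (i+1) with
        | some t => simp only [hL]; exact PySem.Dict.get?_insert_of_ne d _ hne
        | none => simp only [hL]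
      · rfl
    · simp [h]

lemma fbs_go_get (lines : List String) :
    ∀ fuel i d (k : Nat), lines.length - i ≤ fuel → i ≤ k → k < lines.length →
      d.get? (k : Int) = none →
      (find_block_starts_go lines fuel i d).get? (k : Int) = pvClassify lines k := by
  intro fuel
  induction fuel with
  | zero => intro i d k hm hi hk _; omega
  | succ fuel ih =>
    intro i d k hm hi hk hd
    have h : i < lines.length := by omega
    simp only [find_block_starts_go]
    simp only [h, dif_pos]
    by_cases hik : i = k
    · subst hik
      rw [fbs_go_get_lt lines fuel (i+1) _ i (by omega)]
      have hget : lines.getD i "" = lines[i] := List.getD_eq_getElem lines "" h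
      unfold pvClassify
      rw [hget]
      split_ifs with h1 h2 h3
      · simp [PySem.Dict.get?_insert_self]
      · simp [PySem.Dict.get?_insert_self]
      · cases hL : pvLookA lines (PySem.Str.len lines[i] - PySem.Str.len (PySem.Str.lstrip lines[i]))
            (lines.length - (i+1)) (i+1) with
        | some t => simp only [hL]; simp [PySem.Dict.get?_insert_self]
        | none => simp only [hL]; exact hd
      · exact hd
    · have hne : (k : Int) ≠ (i : Int) := by omega
      apply ih (i+1) _ k (by omega) (by omega) hk
      split_ifs with ha hb hc
      · rw [PySem.Dict.get?_insert_of_ne d _ hne]; exact hd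
      · rw [PySem.Dict.get?_insert_of_ne d _ hne]; exact hd
      · cases hL : pvLookA lines (PySem.Str.len lines[i] - PySem.Str.len (PySem.Str.lstrip lines[i]))
            (lines.length - (i+1)) (i+1) with
        | some t => simp only [hL]; rw [PySem.Dict.get?_insert_of_ne d _ hne]; exact hd
        | none => simp only [hL]; exact hd
      · exact hd

lemma fbs_get (lines : List String) (k : Nat) (hk : k < lines.length) :
    (find_block_starts lines).get? (k : Int) = pvClassify lines k := by
  unfold find_block_starts
  exact fbs_go_get lines lines.length 0 _ k (by omega) (by omega) hk (by simp [PySem.Dict.get?_empty])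

lemma dropRev_blanks (l : List String) :
    ∀ p, (∀ s ∈ p, PySem.Str.strip s = "") → pvDropBlanksRev (p ++ l) = pvDropBlanksRev l := by
  intro p hp
  induction p with
  | nil => rfl
  | cons s t ih =>
    have hs : PySem.Str.strip s = "" := hp s (by simp)
    simp [pvDropBlanksRev, hs]
    exact ih (fun x hx => hp x (by simp [hx]))

lemma popA_eq (result pending : List String)
    (hp : ∀ s ∈ pending, PySem.Str.strip s = "")
    (hr : ∀ s, result.getLast? = some s → PySem.Str.strip s ≠ "") :
    pvPopA (result ++ pending) = result := by
  unfold pvPopA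
  rw [List.reverse_append, dropRev_blanks _ _ (by simpa using hp)]
  cases hrev : result.reverse with
  | nil =>
    have hres : result = [] := by simpa using congrArg List.reverse hrev
    rw [hres]
    rfl
  | cons s t =>
    have hlast : result.getLast? = some s := by
      rw [← List.head?_reverse, hrev]; rfl
    have := hr s hlast
    simp [pvDropBlanksRev, this, ← hrev]

lemma main_eq (lines : List String) :
    ∀ fuel i result pending,
      (∀ s ∈ pending, PySem.Str.strip s = "") →
      (∀ s, result.getLast? = some s → PySem.Str.strip s ≠ "") →
      enforce_block_spacing_go lines (find_block_starts lines) fuel i (result ++ pending)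
        = enforce_block_spacing_alt_go lines fuel i result pending := by
  intro fuel
  induction fuel with
  | zero => intro i result pending _ _; rfl
  | succ fuel ih =>
    intro i result pending hp hr
    simp only [enforce_block_spacing_go, enforce_block_spacing_alt_go]
    by_cases h : i < lines.length
    · simp only [h, dif_pos]
      rw [fbs_get lines i h, needed_eq lines i]
      have hget : lines.getD i "" = lines[i] := List.getD_eq_getElem lines "" h
      cases hC : pvClassify lines i with
      | some t =>
        simp only [Option.map_some]
        rw [popA_eq result pending hp hr]
        have hnb : PySem.Str.strip lines[i] ≠ "" := by
          have := classify_nonblank lines i t hC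
          rwa [hget] at this
        have hlast : ∀ r : List String, ∀ s, (r ++ [lines[i]]).getLast? = some s →
            PySem.Str.strip s ≠ "" := by
          intro r s hs
          simp [List.getLast?_append] at hs
          rw [← hs]; exact hnb
        by_cases hres : result = []
        · subst hres
          simpa using ih (i+1) [lines[i]] [] (by simp) (hlast [])
        · simp only [hres]
          have := ih (i+1) (result ++ List.replicate (pvNeedOf t).toNat "\n" ++ [lines[i]]) []
            (by simp) (hlast _)
          simpa [List.append_assoc] using this
      | none =>
        simp only [Option.map_none]
        by_cases hb : PySem.Str.strip lines[i] = ""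
        · simp only [hb]
          have := ih (i+1) result (pending ++ [lines[i]])
            (by intro s hs; rcases List.mem_append.mp hs with h1 | h1
                · exact hp s h1
                · simp at h1; rw [h1]; exact hb) hr
          simpa [List.append_assoc] using this
        · simp only [hb]
          have hlast : ∀ s, (result ++ pending ++ [lines[i]]).getLast? = some s →
              PySem.Str.strip s ≠ "" := by
            intro s hs
            simp [List.getLast?_append] at hs
            rw [← hs]; exact hb
          have := ih (i+1) (result ++ pending ++ [lines[i]]) [] (by simp) hlast
          simpa [List.append_assoc] using this
    · simp [h]

-- ===== VERDICT (by name: the statement is the Claim_ definition above) =====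
theorem enforce_block_spacing_spec : Claim_equal_enforce_block_spacing := by
  intro lines _
  unfold Spec_enforce_block_spacing enforce_block_spacing enforce_block_spacing_alt
  simpa using main_eq lines lines.length 0 [] [] (by simp) (by simp)
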